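-- pv_equiv track=rewrite | github.com/mani319/DSA | arrays/sorted_and_rotated/find_min_and_max.py | maxElementIndex
-- ===== SOURCE A (Python) =====
-- def maxElementIndex(arr, low, high):
--     if(low <= high):
--         mid = low + (high-low)//2
--
--         if(mid < high and arr[mid] > arr[mid+1]):
--             return mid
--         if(mid > low and arr[mid] < arr[mid-1]):
--             return mid-1
--         if(arr[mid] > arr[mid-1]):
--             return maxElementIndex(arr, mid+1, high)
--         else:
--             return maxElementIndex(arr, low, mid-1)
--
--     return high
-- ===== SOURCE B (Python) =====
-- def maxElementIndex(arr, low, high):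
--     while low <= high:
--         mid = low + (high - low) // 2
--         if mid < high and arr[mid] > arr[mid + 1]:
--             return mid
--         if mid > low and arr[mid] < arr[mid - 1]:
--             return mid - 1
--         if arr[mid] > arr[mid - 1]:
--             low = mid + 1
--         else:
--             high = mid - 1
--     return high
-- ===== Notes on version B (the rewrite author's own statement) =====
-- stated objective: idiomatic
-- what changed: The recursive binary search is rewritten as an iterative while-loop that updates low/high in place instead of making tail-recursive calls, avoiding Python call-stack overhead and RecursionError risk.
-- outside the precondition, e.g. on maxElementIndex([3, 1, 2], -3, -1): A returns -3, B returns -3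
import Mathlib
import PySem

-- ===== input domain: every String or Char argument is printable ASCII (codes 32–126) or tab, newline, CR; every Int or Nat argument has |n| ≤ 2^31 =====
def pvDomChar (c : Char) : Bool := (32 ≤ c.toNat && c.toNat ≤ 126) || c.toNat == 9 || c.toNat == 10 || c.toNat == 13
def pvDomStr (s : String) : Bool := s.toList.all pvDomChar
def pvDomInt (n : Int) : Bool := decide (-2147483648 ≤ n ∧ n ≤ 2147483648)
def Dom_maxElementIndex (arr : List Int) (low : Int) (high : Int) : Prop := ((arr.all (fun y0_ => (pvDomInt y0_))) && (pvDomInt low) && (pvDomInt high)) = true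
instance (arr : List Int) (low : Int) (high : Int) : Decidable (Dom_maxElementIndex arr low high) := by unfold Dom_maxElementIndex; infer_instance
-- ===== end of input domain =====

-- B rewrites A's tail-recursive binary search as an iterative while-loop on a (low, high)
-- state; same comparisons in the same order, no call stack. Objective: idiomatic, same cost.

-- ===== PORT A =====
-- Literal transliteration of A's recursion. arr[i] is PySem.List.pyGetD arr i 0:
-- the default 0 is dead code under Pre_, which keeps every access in range (IndexError excluded).
def maxElementIndex (arr : List Int) (low : Int) (high : Int) : Int :=
  if low ≤ high then
    let mid := low + PySem.Int.floordiv (high - low) 2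
    if mid < high ∧ PySem.List.pyGetD arr mid 0 > PySem.List.pyGetD arr (mid + 1) 0 then
      mid
    else if mid > low ∧ PySem.List.pyGetD arr mid 0 < PySem.List.pyGetD arr (mid - 1) 0 then
      mid - 1
    else if PySem.List.pyGetD arr mid 0 > PySem.List.pyGetD arr (mid - 1) 0 then
      maxElementIndex arr (mid + 1) high
    else
      maxElementIndex arr low (mid - 1)
  else high
termination_by (high - low + 1).toNat
decreasing_by
  all_goals
    rename_i h _
    have hd : PySem.Int.floordiv (high - low) 2 = (high - low) / 2 :=
      PySem.Int.floordiv_eq_ediv_of_pos (by omega)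
    simp only [hd] at *
    omega

-- ===== PORT B =====
-- One iteration of Source B's while-loop body: either an early `return` (.inl) or the
-- updated (low, high) state (.inr).
def pvAltStep (arr : List Int) (low : Int) (high : Int) : Sum Int (Int × Int) :=
  let mid := low + PySem.Int.floordiv (high - low) 2
  if mid < high ∧ PySem.List.pyGetD arr mid 0 > PySem.List.pyGetD arr (mid + 1) 0 then
    Sum.inl mid
  else if mid > low ∧ PySem.List.pyGetD arr mid 0 < PySem.List.pyGetD arr (mid - 1) 0 then
    Sum.inl (mid - 1)
  else if PySem.List.pyGetD arr mid 0 > PySem.List.pyGetD arr (mid - 1) 0 then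
    Sum.inr (mid + 1, high)
  else
    Sum.inr (low, mid - 1)

-- Each loop iteration strictly shrinks the window (cited by pvAltLoop's decreasing_by).
theorem pvAltStep_shrink (arr : List Int) (low high l' h' : Int) (hlh : low ≤ high)
    (hst : pvAltStep arr low high = Sum.inr (l', h')) :
    (h' - l' + 1).toNat < (high - low + 1).toNat := by
  have hd : PySem.Int.floordiv (high - low) 2 = (high - low) / 2 :=
    PySem.Int.floordiv_eq_ediv_of_pos (by omega)
  simp only [pvAltStep, hd] at hst
  split_ifs at hst <;>
    simp only [Sum.inr.injEq, Prod.mk.injEq] at hst <;>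
    omega

-- The while-loop driver: run pvAltStep while low ≤ high, then return high.
def pvAltLoop (arr : List Int) (low : Int) (high : Int) : Int :=
  if hlh : low ≤ high then
    match hs : pvAltStep arr low high with
    | Sum.inl r => r
    | Sum.inr (l', h') => pvAltLoop arr l' h'
  else high
termination_by (high - low + 1).toNat
decreasing_by exact pvAltStep_shrink arr low high l' h' hlh hs

def maxElementIndex_alt (arr : List Int) (low : Int) (high : Int) : Int :=
  pvAltLoop arr low high

-- ===== PRECONDITION & SPEC =====
-- Pre_ = the search window either is already empty (low > high: A returns high without
-- touching arr) or lies inside the Python-indexable range including the arr[mid-1]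
-- wraparound to arr[-1]; outside it A's recursion can hit an IndexError.
def Pre_maxElementIndex (arr : List Int) (low : Int) (high : Int) : Prop :=
  low > high ∨ (1 - (arr.length : Int) ≤ low ∧ high < (arr.length : Int))
instance (arr : List Int) (low : Int) (high : Int) : Decidable (Pre_maxElementIndex arr low high) := by
  unfold Pre_maxElementIndex; infer_instance

def pvWitness_maxElementIndex : List Int × Int × Int := ([5, 1, 2, 3, 4], 0, 4)

def Spec_maxElementIndex (arr : List Int) (low : Int) (high : Int) (out : Int) : Prop := out = maxElementIndex_alt arr low high
instance (arr : List Int) (low : Int) (high : Int) (out : Int) : Decidable (Spec_maxElementIndex arr low high out) := by unfold Spec_maxElementIndex; infer_instance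

-- ===== CLAIM (what is proved, stated in full; the proofs are below) =====
def Claim_equal_maxElementIndex : Prop := ∀ (arr : List Int) (low : Int) (high : Int), Dom_maxElementIndex arr low high → Pre_maxElementIndex arr low high → Spec_maxElementIndex arr low high (maxElementIndex arr low high)

-- ===== LEMMAS AND PROOFS =====

-- One unfolding of A's recursion, phrased through B's step function.
theorem pv_A_step (arr : List Int) (low high : Int) (h : low ≤ high) :
    maxElementIndex arr low high =
      (match pvAltStep arr low high with
       | Sum.inl r => r
       | Sum.inr (l', h') => maxElementIndex arr l' h') := by
  rw [maxElementIndex, if_pos h]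
  simp only [pvAltStep]
  split_ifs <;> rfl

-- One unfolding of B's loop.
theorem pv_B_step (arr : List Int) (low high : Int) (h : low ≤ high) :
    pvAltLoop arr low high =
      (match pvAltStep arr low high with
       | Sum.inl r => r
       | Sum.inr (l', h') => pvAltLoop arr l' h') := by
  rw [pvAltLoop, dif_pos h]
  split <;> rename_i heq <;> rw [heq]

-- A's recursion and B's loop agree on every input (the proof does not even need Pre_):
-- each recursive call of A is exactly one pvAltStep iteration of B.
theorem pv_eq_all (fuel : Nat) : ∀ (arr : List Int) (low high : Int),
    (high - low + 1).toNat ≤ fuel → maxElementIndex arr low high = pvAltLoop arr low high := by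
  induction fuel with
  | zero =>
    intro arr low high hf
    have hlh : ¬ low ≤ high := by omega
    rw [maxElementIndex, if_neg hlh, pvAltLoop, dif_neg hlh]
  | succ n ih =>
    intro arr low high hf
    by_cases hlh : low ≤ high
    · rw [pv_A_step arr low high hlh, pv_B_step arr low high hlh]
      rcases hst : pvAltStep arr low high with r | ⟨l', h'⟩
      · rfl
      · exact ih arr l' h' (by
          have := pvAltStep_shrink arr low high l' h' hlh hst
          omega)
    · rw [maxElementIndex, if_neg hlh, pvAltLoop, dif_neg hlh]

-- ===== VERDICT (by name: the statement is the Claim_ definition above) =====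
theorem maxElementIndex_spec : Claim_equal_maxElementIndex := by
  intro arr low high _ _
  unfold Spec_maxElementIndex maxElementIndex_alt
  exact pv_eq_all (high - low + 1).toNat arr low high (le_refl _)
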